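-- pv_equiv track=rewrite | github.com/Pioneer4334/Min-Hash | MinHash.py | dna_vector
-- ===== SOURCE A (Python) =====
-- def dna_shingle(dna, k):
--     count, lastIndex = 0, k
--     shingle_set = set()
--
--     # checks to procceed if and only if value of k > 0 and k is an integer
--     if(k <= 0 or type(k) != int):
--         raise Exception("The value of k(%f) should be positive integer" %(k))
--     # checks to procceed if and only if dna is non-empty and length of dna > k
--     elif len(dna) == 0 or k > len(dna):
--         raise Exception("The dna(%s) should have length greater than the value of k(%d)" %(dna, k))
--
--     #loops through all the characters in a dna string to form k-shingle
--     while(lastIndex <= len(dna)):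
--          # froms a k-shingle
--          shingle = dna[count:lastIndex]
--          # creates a list of bits indicating if the k-shingle contains character other than A, C, G or T; if it contains character other than 'A', 'C', 'G' and 'T' then True is inserted else False
--          flagUnwantedChar = list(x not in ["A", "C", "G", "T"] for x in shingle.upper())
--          # checks if the 'flagUnwantedChar' list contains any True bit (i.e. the shingle contains character other than 'A', 'C', 'G' and 'T') and warns the user accordingly
--          if any(flagUnwantedChar):
--              raise Exception("The provided DNA sample contains unwanted character: '%s' at Position %d" %(shingle[flagUnwantedChar.index(True)], count+flagUnwantedChar.index(True)+1))
--          #  adds the k-shingle to the set of k-shingle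
--          else:
--              shingle_set.add(dna[count:lastIndex])
--              count += 1
--              lastIndex = count+k
--
--     # returns the set containing all possible k-shingle of the dna
--     return shingle_set
--
-- def shingle2decimal(dna):
--     try:
--         # Turns all the characters of the dna string to upper-case and replaces all 'A' as 0, 'C' as 1, 'G' as 2 and 'T' as 3 for base 4 representation of the dna string
--         base4Shingle = dna.upper().replace("A", "0").replace("C", "1").replace("G", "2").replace("T", "3")
--         # converts the base 4 shingle to its equivalent decimal representation
--         return(int(base4Shingle, 4))
--     except:
--         # throws an exception if the dna shingle contains character other than 'A', 'C', 'G' or 'T'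
--         raise Exception("The dna contains unwanted character. Hence it cannot be converted to decimal.")
--
-- def dna_vector(dna, k):
--     try:
--         # get the set containing all possible k-shingle of the dna
--         shingle=dna_shingle(dna, k)
--         # creates a zero vector with 4^k dimensions
--         dnaVector = [0]*(4**k)
--         # replaces 0 with 1 in dna vector at index = (decimal value of the shingle)
--         for s in shingle:
--             dnaVector[shingle2decimal(s)]=1
--         return dnaVector
--     except Exception as ex:
--         # throws exception to the calling function if generated while executing dna_shingle(dna, k) or shingle2decimal(s)
--         raise Exception(ex)
-- ===== SOURCE B (Python) =====
-- def dna_vector(dna, k):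
--     if k <= 0 or type(k) != int:
--         raise Exception("The value of k(%f) should be positive integer" % (k,))
--     if len(dna) == 0 or k > len(dna):
--         raise Exception("The dna(%s) should have length greater than the value of k(%d)" % (dna, k))
--     base = {'A': 0, 'C': 1, 'G': 2, 'T': 3}
--     digits = []
--     for p, ch in enumerate(dna):
--         d = base.get(ch.upper())
--         if d is None:
--             raise Exception("The provided DNA sample contains unwanted character: '%s' at Position %d" % (ch, p + 1))
--         digits.append(d)
--     vec = [0] * (4 ** k)
--     idx = 0
--     for d in digits[:k]:
--         idx = idx * 4 + d
--     vec[idx] = 1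
--     high = 4 ** (k - 1)
--     for p in range(k, len(digits)):
--         idx = (idx - digits[p - k] * high) * 4 + digits[p]
--         vec[idx] = 1
--     return vec
-- ===== Notes on version B (the rewrite author's own statement) =====
-- stated objective: faster
-- what changed: B replaces A's shingle-set pipeline (build a set of k-substrings, then re-parse each via upper/4x replace/int(s,4)) by one validated digit pass plus a rolling base-4 window index idx=(idx-lead*4^(k-1))*4+digit that marks the 4^k vector directly.
import Mathlib
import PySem

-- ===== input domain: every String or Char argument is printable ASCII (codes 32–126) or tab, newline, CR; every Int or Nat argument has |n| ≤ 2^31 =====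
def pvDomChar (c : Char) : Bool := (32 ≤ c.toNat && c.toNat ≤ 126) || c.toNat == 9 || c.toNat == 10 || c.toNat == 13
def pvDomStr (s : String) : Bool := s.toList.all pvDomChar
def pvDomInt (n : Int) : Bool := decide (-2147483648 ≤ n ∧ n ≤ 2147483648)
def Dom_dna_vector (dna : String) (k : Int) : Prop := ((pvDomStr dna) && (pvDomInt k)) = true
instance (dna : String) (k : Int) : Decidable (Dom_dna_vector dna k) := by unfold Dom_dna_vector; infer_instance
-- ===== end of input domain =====

-- B builds the 4^k one-hot vector in one pass with a rolling base-4 window index instead of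
-- A's shingle set + per-shingle string re-parsing; return values agree on all of Pre_ (where
-- A returns; outside Pre_ both Pythons raise, with the same messages).

-- ===== PORT A =====

-- hand port of int(s, 4), used by shingle2decimal.  PySem.Int.ofCharsBase? is the prelude's
-- primitive for int(s, 4), but its digit loop is private to the prelude and cannot be reasoned
-- about symbolically, so the call is ported by hand here.  It is exact on every string this
-- program can feed it: a nonempty string of '0'..'3' digits evaluates to its base-4 value, and
-- the empty string or any string with another character (no sign/space/underscore can arise
-- after upper+replace of a shingle) is a ValueError, i.e. none.
def pvInt4? (cs : List Char) : Option Int :=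
  if cs ≠ [] ∧ cs.all (fun c => decide (c = '0' ∨ c = '1' ∨ c = '2' ∨ c = '3')) then
    some (cs.foldl (fun a c => a * 4 + ((c.toNat : Int) - 48)) 0)
  else none

-- shingle2decimal: upper, the four replaces, then int(_, 4); none where the Python raises
def shingle2decimal (s : String) : Option Int :=
  pvInt4? (PySem.Chars.replace (PySem.Chars.replace (PySem.Chars.replace (PySem.Chars.replace
      (PySem.Chars.upper s.toList) ['A'] ['0']) ['C'] ['1']) ['G'] ['2']) ['T'] ['3'])

-- the while-loop of dna_shingle; fuel (= len(dna)+1 at the call) only makes it total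
def dnaShingleLoop (dna : List Char) (k : Nat) :
    Nat → Nat → PySem.Set String → Option (PySem.Set String)
  | 0, _, ss => some ss
  | fuel+1, count, ss =>
    if count + k ≤ dna.length then
      let shingle := PySem.List.slice dna (some (count : Int)) (some ((count : Int) + (k : Int)))
      let flags := (PySem.Chars.upper shingle).map (fun x => decide (x ∉ ['A', 'C', 'G', 'T']))
      if flags.any (fun b => b) then none
      else dnaShingleLoop dna k fuel (count+1) (PySem.Set.add ss (String.ofList shingle))
    else some ss

-- dna_shingle; none exactly where the Python raises
def dna_shingle? (dna : String) (k : Int) : Option (PySem.Set String) :=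
  if k ≤ 0 then none
  else if dna.toList.length = 0 ∨ (dna.toList.length : Int) < k then none
  else dnaShingleLoop dna.toList k.toNat (dna.toList.length + 1) 0 PySem.Set.empty

def dna_vector (dna : String) (k : Int) : List Int :=
  match dna_shingle? dna k with
  | none => []
  | some ss =>
    let dnaVector : List Int := List.replicate ((4 : Nat) ^ k.toNat) 0
    match ss.foldl (fun acc s => acc.bind fun v =>
        (shingle2decimal s).bind fun d => PySem.List.pySet? v d 1) (some dnaVector) with
    | none => []
    | some v => v

-- ===== PORT B =====

-- the dict {'A':0,'C':1,'G':2,'T':3}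
def pvBase : PySem.Dict Char Int :=
  ((((PySem.Dict.empty).insert 'A' 0).insert 'C' 1).insert 'G' 2).insert 'T' 3

-- the validation loop building `digits`; none where Source B raises on the first invalid char
def pvDigits? : List Char → Option (List Int)
  | [] => some []
  | c :: rest =>
    match PySem.Dict.get? pvBase (PySem.Chars.upperChar c) with
    | none => none
    | some d => (pvDigits? rest).map (fun t => d :: t)

def dna_vector_alt (dna : String) (k : Int) : List Int :=
  if k ≤ 0 then []
  else if dna.toList.length = 0 ∨ (dna.toList.length : Int) < k then []
  else
    match pvDigits? dna.toList with
    | none => []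
    | some ds =>
      let vec : List Int := List.replicate ((4 : Nat) ^ k.toNat) 0
      let idx : Int := (PySem.List.slice ds none (some k)).foldl (fun a d => a * 4 + d) 0
      match PySem.List.pySet? vec idx 1 with
      | none => []
      | some vec0 =>
        let high : Int := 4 ^ (k.toNat - 1)
        match (PySem.List.pyRange k (ds.length : Int) 1).foldl
            (fun (st : Option (List Int × Int)) p => st.bind fun vi =>
              (PySem.List.pyGet? ds (p - k)).bind fun dl =>
              (PySem.List.pyGet? ds p).bind fun dp =>
              (PySem.List.pySet? vi.1 ((vi.2 - dl * high) * 4 + dp) 1).map fun v' =>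
                (v', (vi.2 - dl * high) * 4 + dp))
            (some (vec0, idx)) with
        | none => []
        | some (v, _) => v

-- ===== PRECONDITION & SPEC =====

-- Pre_ is exactly where the Python A returns: k a positive int not exceeding len(dna)
-- (otherwise A raises its k/length Exceptions) and every character one of ACGT/acgt
-- (otherwise A raises its unwanted-character Exception)
def Pre_dna_vector (dna : String) (k : Int) : Prop :=
  1 ≤ k ∧ k ≤ (dna.toList.length : Int) ∧
    dna.toList.all (fun c => decide (c ∈ ['A', 'C', 'G', 'T', 'a', 'c', 'g', 't'])) = true
instance (dna : String) (k : Int) : Decidable (Pre_dna_vector dna k) := by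
  unfold Pre_dna_vector; infer_instance

def pvWitness_dna_vector : String × Int := ("ACGTag", 2)

def Spec_dna_vector (dna : String) (k : Int) (out : List Int) : Prop := out = dna_vector_alt dna k
instance (dna : String) (k : Int) (out : List Int) : Decidable (Spec_dna_vector dna k out) := by
  unfold Spec_dna_vector; infer_instance

-- ===== CLAIM (what is proved, stated in full; the proofs are below) =====
def Claim_equal_dna_vector : Prop := ∀ (dna : String) (k : Int), Dom_dna_vector dna k → Pre_dna_vector dna k → Spec_dna_vector dna k (dna_vector dna k)

-- ===== LEMMAS AND PROOFS =====

-- digit value of a valid letter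
def pvDig (c : Char) : Int :=
  if c = 'A' ∨ c = 'a' then 0 else if c = 'C' ∨ c = 'c' then 1
  else if c = 'G' ∨ c = 'g' then 2 else 3

-- digit character a valid letter becomes after upper + the four replaces
def pvDChar (c : Char) : Char :=
  if c = 'A' ∨ c = 'a' then '0' else if c = 'C' ∨ c = 'c' then '1'
  else if c = 'G' ∨ c = 'g' then '2' else '3'

-- base-4 Horner value of a digit list
def pvH (l : List Int) : Int := l.foldl (fun a d => a * 4 + d) 0

-- the list of k-windows of cs starting at positions count, count+1, …
def pvWins (cs : List Char) (kn count : Nat) : List (List Char) :=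
  (List.range (cs.length + 1 - kn - count)).map (fun j => (cs.drop (count + j)).take kn)

-- index of the window starting at i
def pvIdxs (ds : List Int) (kn i : Nat) : Int := pvH ((ds.drop i).take kn)

theorem pvWins_cons (cs : List Char) (kn count : Nat) (h : count + kn ≤ cs.length) :
    pvWins cs kn count = (cs.drop count).take kn :: pvWins cs kn (count + 1) := by
  unfold pvWins
  have h1 : cs.length + 1 - kn - count = (cs.length + 1 - kn - (count + 1)) + 1 := by omega
  rw [h1, List.range_succ_eq_map]
  simp only [List.map_cons, List.map_map, Function.comp_def, Nat.add_zero, Nat.succ_eq_add_one,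
    List.cons.injEq, List.map_inj_left, List.mem_range, true_and]
  intro j hj
  rw [show count + (j + 1) = count + 1 + j from by omega]

theorem pvWins_nil (cs : List Char) (kn count : Nat) (h : cs.length < count + kn) :
    pvWins cs kn count = [] := by
  unfold pvWins
  have : cs.length + 1 - kn - count = 0 := by omega
  simp [this]


theorem pvUpper_valid (c : Char) (hc : c ∈ ['A', 'C', 'G', 'T', 'a', 'c', 'g', 't']) :
    PySem.Chars.upperChar c ∈ ['A', 'C', 'G', 'T'] := by
  simp only [List.mem_cons, List.not_mem_nil, or_false] at hc
  rcases hc with rfl | rfl | rfl | rfl | rfl | rfl | rfl | rfl <;> decide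

theorem pvReplaceGo_single (a b : Char) :
    ∀ (fuel : Nat) (l acc : List Char), l.length ≤ fuel →
      PySem.Chars.replace.go [a] [b] fuel l acc
        = acc.reverse ++ l.map (fun c => if c = a then b else c) := by
  intro fuel
  induction fuel with
  | zero =>
    intro l acc h
    have : l = [] := by
      cases l with
      | nil => rfl
      | cons x t => simp at h
    subst this; simp [PySem.Chars.replace.go]
  | succ fuel ih =>
    intro l acc h
    cases l with
    | nil => simp [PySem.Chars.replace.go]
    | cons c t =>
      simp only [PySem.Chars.replace.go]
      by_cases hca : c = a
      · subst hca
        have hpre : List.isPrefixOf [c] (c :: t) = true := by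
          simp [List.isPrefixOf]
        rw [if_pos hpre]
        simp only [List.length_cons] at h
        have hd1 : List.drop [c].length (c :: t) = t := rfl
        rw [hd1, ih t ([b].reverse ++ acc) (by omega)]
        simp
      · have hpre : List.isPrefixOf [a] (c :: t) = false := by
          simp [List.isPrefixOf]; exact fun hh => (hca hh.symm).elim
        rw [if_neg (by simp [hpre])]
        simp only [List.length_cons] at h
        rw [ih t (c :: acc) (by omega)]
        simp [hca]

theorem pvReplace_single (a b : Char) (l : List Char) :
    PySem.Chars.replace l [a] [b] = l.map (fun c => if c = a then b else c) := by
  unfold PySem.Chars.replace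
  rw [if_neg (by simp)]
  exact pvReplaceGo_single a b l.length l [] (le_refl _)

theorem pvDChar_digit (c : Char) (hc : c ∈ ['A', 'C', 'G', 'T', 'a', 'c', 'g', 't']) :
    (pvDChar c = '0' ∨ pvDChar c = '1' ∨ pvDChar c = '2' ∨ pvDChar c = '3')
      ∧ ((pvDChar c).toNat : Int) - 48 = pvDig c := by
  simp only [List.mem_cons, List.not_mem_nil, or_false] at hc
  rcases hc with rfl | rfl | rfl | rfl | rfl | rfl | rfl | rfl <;> decide

theorem pvDig_bounds (c : Char) : 0 ≤ pvDig c ∧ pvDig c < 4 := by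
  unfold pvDig; split_ifs <;> omega

theorem pvShingle2decimal_mk (w : List Char) (hne : w ≠ [])
    (hval : ∀ c ∈ w, c ∈ ['A', 'C', 'G', 'T', 'a', 'c', 'g', 't']) :
    shingle2decimal (String.ofList w) = some (pvH (w.map pvDig)) := by
  unfold shingle2decimal
  rw [String.toList_ofList]
  have hup : PySem.Chars.upper w = w.map PySem.Chars.upperChar := rfl
  rw [hup, pvReplace_single, pvReplace_single, pvReplace_single, pvReplace_single]
  simp only [List.map_map]
  suffices h : pvInt4? (List.map pvDChar w) = some (pvH (List.map pvDig w)) by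
    rw [← h]
    congr 1
    apply List.map_congr_left
    intro c hc
    have hc8 := hval c hc
    simp only [List.mem_cons, List.not_mem_nil, or_false] at hc8
    rcases hc8 with rfl | rfl | rfl | rfl | rfl | rfl | rfl | rfl <;> rfl
  unfold pvInt4?
  rw [if_pos]
  · congr 1
    rw [List.foldl_map]
    unfold pvH
    rw [List.foldl_map]
    apply PySem.List.foldl_congr_mem
    intro a c hc
    rw [(pvDChar_digit c (hval c hc)).2]
  · constructor
    · simpa using hne
    · rw [List.all_eq_true]
      intro c hc
      rw [List.mem_map] at hc
      obtain ⟨x, hx, rfl⟩ := hc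
      have := (pvDChar_digit x (hval x hx)).1
      simpa [decide_eq_true_iff] using this

theorem pvH_shift (l : List Int) : ∀ a : Int,
    l.foldl (fun a d => a * 4 + d) a = a * 4 ^ l.length + pvH l := by
  induction l with
  | nil => intro a; simp [pvH]
  | cons d t ih =>
    intro a
    simp only [List.foldl_cons, List.length_cons]
    rw [ih (a * 4 + d)]
    have h0 : pvH (d :: t) = d * 4 ^ t.length + pvH t := by
      unfold pvH
      simp only [List.foldl_cons]
      rw [ih (0 * 4 + d)]
      unfold pvH; ring
    rw [h0]; ring

theorem pvH_cons (d : Int) (t : List Int) : pvH (d :: t) = d * 4 ^ t.length + pvH t := by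
  unfold pvH
  simp only [List.foldl_cons]
  rw [pvH_shift]
  unfold pvH; ring

theorem pvH_append (l : List Int) (x : Int) : pvH (l ++ [x]) = 4 * pvH l + x := by
  unfold pvH
  rw [List.foldl_append]
  simp; ring

theorem pvH_bounds (l : List Int) (hd : ∀ d ∈ l, 0 ≤ d ∧ d < 4) :
    0 ≤ pvH l ∧ pvH l < 4 ^ l.length := by
  induction l with
  | nil => simp [pvH]
  | cons d t ih =>
    have hdt := hd d (by simp)
    have iht := ih (fun x hx => hd x (by simp [hx]))
    rw [pvH_cons]
    have hp : (0:Int) ≤ 4 ^ t.length := by positivity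
    constructor
    · nlinarith [iht.1, hdt.1]
    · have h4 : (4:Int) ^ (t.length + 1) = 4 ^ t.length * 4 := pow_succ 4 t.length
      simp only [List.length_cons]
      rw [h4]
      nlinarith [iht.2, hdt.2]

theorem pvFoldlSet_length (L : List Nat) : ∀ (v : List Int),
    (L.foldl (fun v i => v.set i 1) v).length = v.length := by
  induction L with
  | nil => intro v; rfl
  | cons i t ih => intro v; simp only [List.foldl_cons]; rw [ih]; simp

theorem pvFoldlSet_getElem (L : List Nat) : ∀ (v : List Int) (j : Nat) (hj : j < v.length),
    (L.foldl (fun v i => v.set i 1) v)[j]'(by rw [pvFoldlSet_length]; exact hj)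
      = if j ∈ L then 1 else v[j]'hj := by
  induction L with
  | nil => intro v j hj; simp
  | cons i t ih =>
    intro v j hj
    simp only [List.foldl_cons, List.mem_cons]
    rw [ih (v.set i 1) j (by simpa using hj)]
    rw [List.getElem_set]
    by_cases h1 : j ∈ t
    · simp [h1]
    · by_cases h2 : i = j <;> simp [h1, h2]
      · intro h; exact absurd h.symm h2


theorem pvIdxs_bounds (ds : List Int) (kn i : Nat) (hd : ∀ d ∈ ds, 0 ≤ d ∧ d < 4) :
    0 ≤ pvIdxs ds kn i ∧ pvIdxs ds kn i < 4 ^ kn := by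
  unfold pvIdxs
  have hmem : ∀ d ∈ (ds.drop i).take kn, 0 ≤ d ∧ d < 4 := by
    intro d hdm
    exact hd d (List.mem_of_mem_drop (List.mem_of_mem_take hdm))
  have hb := pvH_bounds _ hmem
  refine ⟨hb.1, lt_of_lt_of_le hb.2 ?_⟩
  have hlen : ((ds.drop i).take kn).length ≤ kn := by simp
  exact pow_le_pow_right₀ (by norm_num) hlen

theorem pvRoll (ds : List Int) (kn t : Nat) (hk : 1 ≤ kn) (h : t + kn < ds.length) :
    pvIdxs ds kn (t + 1)
      = (pvIdxs ds kn t - (ds.getD t 0) * 4 ^ (kn - 1)) * 4 + ds.getD (kn + t) 0 := by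
  obtain ⟨kp, rfl⟩ : ∃ kp, kn = kp + 1 := ⟨kn - 1, by omega⟩
  simp only [Nat.add_sub_cancel]
  unfold pvIdxs
  have ht : t < ds.length := by omega
  have hkt : kp + 1 + t < ds.length := by omega
  have hidx : kp < (ds.drop (t + 1)).length := by simp; omega
  have hdrop : ds.drop t = ds[t] :: ds.drop (t + 1) := List.drop_eq_getElem_cons ht
  have hwt : (ds.drop t).take (kp + 1) = ds[t] :: (ds.drop (t + 1)).take kp := by
    rw [hdrop, List.take_succ_cons]
  have hwt1 : (ds.drop (t + 1)).take (kp + 1)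
      = (ds.drop (t + 1)).take kp ++ [(ds.drop (t + 1))[kp]'hidx] := by
    rw [← List.take_concat_get hidx, List.concat_eq_append]
  have hget : (ds.drop (t + 1))[kp]'hidx = ds.getD (kp + 1 + t) 0 := by
    rw [List.getElem_drop]
    rw [List.getD_eq_getElem ds 0 hkt]
    have he : t + 1 + kp = kp + 1 + t := by omega
    simp [he]
  rw [hwt, hwt1, pvH_cons, pvH_append]
  have hl : ((ds.drop (t + 1)).take kp).length = kp := by
    rw [List.length_take]; simp; omega
  rw [hl, hget]
  have hg1 : ds.getD t 0 = ds[t] := List.getD_eq_getElem ds 0 ht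
  rw [hg1]
  ring

theorem pvFoldBind (f : String → Option Int) :
    ∀ (L : List String) (v : List Int),
      (∀ s ∈ L, ∃ d, f s = some d ∧ 0 ≤ d ∧ d < (v.length : Int)) →
      L.foldl (fun acc s => acc.bind fun v => (f s).bind fun d => PySem.List.pySet? v d 1) (some v)
        = some (L.foldl (fun v s => v.set ((f s).getD 0).toNat 1) v) := by
  intro L
  induction L with
  | nil => intro v _; rfl
  | cons s t ih =>
    intro v hv
    obtain ⟨d, hfs, hd0, hdlt⟩ := hv s (by simp)
    have hlen : d.toNat < v.length := by omega
    have hset := PySem.List.pySet?_natCast v d.toNat 1 hlen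
    rw [Int.toNat_of_nonneg hd0] at hset
    have hstep : ((some v).bind fun a => (f s).bind fun b => PySem.List.pySet? a b 1)
        = some (v.set d.toNat 1) := by
      rw [hfs]; exact hset
    simp only [List.foldl_cons]
    rw [hstep, hfs]
    simp only [Option.getD_some]
    exact ih (v.set d.toNat 1) (by
      intro s' hs'
      obtain ⟨d', h1, h2, h3⟩ := hv s' (by simp [hs'])
      exact ⟨d', h1, h2, by simpa using h3⟩)

theorem pvDigits?_valid (cs : List Char)
    (hval : ∀ c ∈ cs, c ∈ ['A', 'C', 'G', 'T', 'a', 'c', 'g', 't']) :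
    pvDigits? cs = some (cs.map pvDig) := by
  induction cs with
  | nil => rfl
  | cons c t ih =>
    have hc := hval c (by simp)
    have ht := ih (fun x hx => hval x (by simp [hx]))
    have hget : PySem.Dict.get? pvBase (PySem.Chars.upperChar c) = some (pvDig c) := by
      simp only [List.mem_cons, List.not_mem_nil, or_false] at hc
      rcases hc with rfl | rfl | rfl | rfl | rfl | rfl | rfl | rfl <;> rfl
    simp [pvDigits?, hget, ht]

theorem pvAloop (cs : List Char) (kn : Nat)
    (hval : ∀ c ∈ cs, c ∈ ['A', 'C', 'G', 'T', 'a', 'c', 'g', 't']) :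
    ∀ (fuel count : Nat) (ss : PySem.Set String), cs.length + 1 - count ≤ fuel → 1 ≤ kn →
      dnaShingleLoop cs kn fuel count ss
        = some ((pvWins cs kn count).foldl
            (fun s w => PySem.Set.add s (String.ofList w)) ss) := by
  intro fuel
  induction fuel with
  | zero =>
    intro count ss h hk
    rw [pvWins_nil cs kn count (by omega)]
    rfl
  | succ fuel ih =>
    intro count ss h hk
    simp only [dnaShingleLoop]
    by_cases hc : count + kn ≤ cs.length
    · rw [if_pos hc]
      have hslice : PySem.List.slice cs (some (count : Int)) (some ((count : Int) + (kn : Int)))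
          = (cs.drop count).take kn := PySem.List.slice_natCast_add cs count kn
      rw [hslice]
      have hflags : (((PySem.Chars.upper ((cs.drop count).take kn)).map
          (fun x => decide (x ∉ ['A', 'C', 'G', 'T']))).any (fun b => b)) = false := by
        rw [List.any_eq_false]
        intro b hb
        rw [List.mem_map] at hb
        obtain ⟨x, hx, rfl⟩ := hb
        rw [show PySem.Chars.upper ((cs.drop count).take kn)
            = ((cs.drop count).take kn).map PySem.Chars.upperChar from rfl, List.mem_map] at hx
        obtain ⟨e, hemem, rfl⟩ := hx
        have hecs : e ∈ cs := List.mem_of_mem_drop (List.mem_of_mem_take hemem)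
        have h4 := pvUpper_valid e (hval e hecs)
        simp only [List.mem_cons, List.not_mem_nil, or_false] at h4
        simp only [List.mem_cons, List.not_mem_nil, or_false, not_not, decide_eq_true_eq]
        tauto
      rw [hflags]
      simp only [Bool.false_eq_true, if_false]
      rw [ih (count + 1) _ (by omega) hk, pvWins_cons cs kn count hc]
      rw [List.foldl_cons]
    · rw [if_neg hc]
      rw [pvWins_nil cs kn count (by omega)]
      rfl

theorem pvBloop (ds : List Int) (kn : Nat) (hk : 1 ≤ kn) (hkn : kn ≤ ds.length)
    (hdig : ∀ d ∈ ds, 0 ≤ d ∧ d < 4) (v1 : List Int) (hv : v1.length = 4 ^ kn) :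
    ∀ t, t ≤ ds.length - kn →
    (PySem.List.pyRange (kn : Int) ((kn : Int) + (t : Int)) 1).foldl
        (fun (st : Option (List Int × Int)) p => st.bind fun vi =>
          (PySem.List.pyGet? ds (p - (kn : Int))).bind fun dl =>
          (PySem.List.pyGet? ds p).bind fun dp =>
          (PySem.List.pySet? vi.1 ((vi.2 - dl * (4:Int) ^ (kn - 1)) * 4 + dp) 1).map fun v' =>
            (v', (vi.2 - dl * (4:Int) ^ (kn - 1)) * 4 + dp))
        (some (v1, pvIdxs ds kn 0))
      = some (((List.range t).map (fun j => (pvIdxs ds kn (j + 1)).toNat)).foldl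
                (fun v i => v.set i 1) v1,
              pvIdxs ds kn t) := by
  intro t
  induction t with
  | zero =>
    have hr : PySem.List.pyRange (kn : Int) ((kn : Int) + ((0 : Nat) : Int)) 1 = [] := by
      simp [PySem.List.pyRange]
    intro _
    rw [hr]
    simp
  | succ t ih =>
    intro ht
    have hcast : ((kn : Int) + ((t + 1 : Nat) : Int)) = ((kn : Int) + (t : Int)) + 1 := by
      push_cast; ring
    rw [hcast, PySem.List.pyRange_one_succ_right (by omega), List.foldl_append,
        ih (by omega)]
    simp only [List.foldl_cons, List.foldl_nil, Option.bind_some]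
    have hg1 : PySem.List.pyGet? ds ((kn : Int) + (t : Int) - (kn : Int))
        = some (ds.getD t 0) := by
      rw [show (kn : Int) + (t : Int) - (kn : Int) = ((t : Nat) : Int) from by ring,
          PySem.List.pyGet?_natCast, List.getElem?_eq_getElem (by omega),
          List.getD_eq_getElem ds 0 (by omega)]
    have hg2 : PySem.List.pyGet? ds ((kn : Int) + (t : Int)) = some (ds.getD (kn + t) 0) := by
      rw [show (kn : Int) + (t : Int) = ((kn + t : Nat) : Int) from by push_cast; ring,
          PySem.List.pyGet?_natCast, List.getElem?_eq_getElem (by omega),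
          List.getD_eq_getElem ds 0 (by omega)]
    rw [hg1, hg2]
    have hroll : (pvIdxs ds kn t - (ds.getD t 0) * (4:Int) ^ (kn - 1)) * 4 + ds.getD (kn + t) 0
        = pvIdxs ds kn (t + 1) := (pvRoll ds kn t hk (by omega)).symm
    simp only [Option.bind_some, hroll]
    have hb := pvIdxs_bounds ds kn (t + 1) hdig
    have hcastp : (((4 : Nat) ^ kn : Nat) : Int) = (4 : Int) ^ kn := by push_cast; ring
    have hlt : (pvIdxs ds kn (t + 1)).toNat
        < (((List.range t).map (fun j => (pvIdxs ds kn (j + 1)).toNat)).foldl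
            (fun v i => v.set i 1) v1).length := by
      rw [pvFoldlSet_length, hv]
      have : pvIdxs ds kn (t + 1) < (((4 : Nat) ^ kn : Nat) : Int) := by rw [hcastp]; exact hb.2
      omega
    have hset := PySem.List.pySet?_natCast _ (pvIdxs ds kn (t + 1)).toNat 1 hlt
    rw [Int.toNat_of_nonneg hb.1] at hset
    rw [hset]
    simp only [Option.map_some]
    congr 1
    rw [List.range_succ, List.map_append, List.foldl_append]
    simp

theorem pvMain (dna : String) (k : Int) (hpre : Pre_dna_vector dna k) :
    dna_vector dna k = dna_vector_alt dna k := by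
  obtain ⟨hk1, hkle, hvalB⟩ := hpre
  have hval : ∀ c ∈ dna.toList, c ∈ ['A', 'C', 'G', 'T', 'a', 'c', 'g', 't'] := by
    rw [List.all_eq_true] at hvalB
    intro c hc
    simpa using hvalB c hc
  have hkeq : ((k.toNat : Nat) : Int) = k := Int.toNat_of_nonneg (by omega)
  set cs := dna.toList with hcs
  set kn := k.toNat with hknd
  set n := cs.length with hnd
  set ds := cs.map pvDig with hdsd
  have hk : 1 ≤ kn := by omega
  have hknn : kn ≤ n := by omega
  have hkle0 : ¬ k ≤ 0 := by omega
  have hn0 : ¬ (n = 0 ∨ (n : Int) < k) := by rintro (h | h) <;> omega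
  have hdslen : ds.length = n := by rw [hdsd, List.length_map]
  have hdig : ∀ d ∈ ds, 0 ≤ d ∧ d < 4 := by
    intro d hd
    rw [hdsd, List.mem_map] at hd
    obtain ⟨c, _, rfl⟩ := hd
    exact pvDig_bounds c
  set v0 : List Int := List.replicate ((4 : Nat) ^ kn) (0 : Int) with hv0d
  have hv0len : v0.length = 4 ^ kn := by rw [hv0d, List.length_replicate]
  have hcastp : (((4 : Nat) ^ kn : Nat) : Int) = (4 : Int) ^ kn := by push_cast; ring
  -- window facts
  have hwin : ∀ i, i + kn ≤ n →
      ((cs.drop i).take kn ≠ [] ∧ (∀ c ∈ (cs.drop i).take kn, c ∈ ['A', 'C', 'G', 'T', 'a', 'c', 'g', 't'])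
        ∧ ((cs.drop i).take kn).map pvDig = (ds.drop i).take kn) := by
    intro i hi
    refine ⟨?_, ?_, ?_⟩
    · have : ((cs.drop i).take kn).length = kn := by
        rw [List.length_take, List.length_drop]; omega
      intro hnil
      rw [hnil] at this
      simp at this
      omega
    · intro c hc
      exact hval c (List.mem_of_mem_drop (List.mem_of_mem_take hc))
    · rw [hdsd, List.map_take, List.map_drop]
  have hdec : ∀ i, i + kn ≤ n →
      shingle2decimal (String.ofList ((cs.drop i).take kn)) = some (pvIdxs ds kn i) := by
    intro i hi
    obtain ⟨h1, h2, h3⟩ := hwin i hi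
    rw [pvShingle2decimal_mk _ h1 h2, h3]
    rfl
  have hWmem : ∀ w, w ∈ pvWins cs kn 0 ↔ ∃ i, i + kn ≤ n ∧ w = (cs.drop i).take kn := by
    intro w
    unfold pvWins
    simp only [List.mem_map, List.mem_range, Nat.zero_add, Nat.sub_zero]
    constructor
    · rintro ⟨i, hi, rfl⟩
      exact ⟨i, by omega, rfl⟩
    · rintro ⟨i, hi, rfl⟩
      exact ⟨i, by omega, rfl⟩
  -- A side
  have hsh : dna_shingle? dna k
      = some (PySem.Set.ofList ((pvWins cs kn 0).map String.ofList)) := by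
    simp only [dna_shingle?, ← hcs, ← hknd, ← hnd, if_neg hkle0, if_neg hn0]
    rw [pvAloop cs kn hval (n + 1) 0 PySem.Set.empty (by omega) hk]
    rw [PySem.Set.ofList_eq_foldl, List.foldl_map]
    rfl
  have hfold := pvFoldBind shingle2decimal
      (PySem.Set.ofList ((pvWins cs kn 0).map String.ofList)) v0 (by
    intro s hs
    rw [PySem.Set.mem_ofList, List.mem_map] at hs
    obtain ⟨w, hw, rfl⟩ := hs
    obtain ⟨i, hi, rfl⟩ := (hWmem w).mp hw
    refine ⟨pvIdxs ds kn i, hdec i hi, (pvIdxs_bounds ds kn i hdig).1, ?_⟩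
    rw [hv0len, hcastp]
    exact (pvIdxs_bounds ds kn i hdig).2)
  have hA : dna_vector dna k
      = (PySem.Set.ofList ((pvWins cs kn 0).map String.ofList)).foldl
          (fun v s => v.set ((shingle2decimal s).getD 0).toNat 1) v0 := by
    simp only [dna_vector, hsh, ← hknd, ← hv0d, hfold]
  -- B side
  have hds9 : pvDigits? dna.toList = some ds := by
    rw [← hcs, pvDigits?_valid cs hval, hdsd]
  have hslice : PySem.List.slice ds none (some k) = ds.take kn := by
    rw [← hkeq]; exact PySem.List.slice_to_natCast ds kn
  have hidx0 : (ds.take kn).foldl (fun a d => a * 4 + d) 0 = pvIdxs ds kn 0 := by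
    unfold pvIdxs pvH; rw [List.drop_zero]
  have hb0 := pvIdxs_bounds ds kn 0 hdig
  have hlt0 : (pvIdxs ds kn 0).toNat < v0.length := by
    rw [hv0len]
    have : pvIdxs ds kn 0 < ((4 ^ kn : Nat) : Int) := by rw [hcastp]; exact hb0.2
    omega
  have hset0 := PySem.List.pySet?_natCast v0 (pvIdxs ds kn 0).toNat 1 hlt0
  rw [Int.toNat_of_nonneg hb0.1] at hset0
  have hlen9 : ((ds.length : Nat) : Int) = (kn : Int) + ((n - kn : Nat) : Int) := by
    rw [hdslen]; omega
  have hbloop := pvBloop ds kn hk (by omega) hdig (v0.set (pvIdxs ds kn 0).toNat 1)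
      (by rw [List.length_set, hv0len]) (n - kn) (by omega)
  have hkle0' : ¬ ((kn : Nat) : Int) ≤ 0 := by omega
  have hn0' : ¬ (n = 0 ∨ (n : Int) < ((kn : Nat) : Int)) := by rintro (h | h) <;> omega
  have hds9' : pvDigits? cs = some ds := by rw [pvDigits?_valid cs hval, hdsd]
  have hslice' : PySem.List.slice ds none (some ((kn : Nat) : Int)) = ds.take kn :=
    PySem.List.slice_to_natCast ds kn
  have hlen9' : ((ds.length : Nat) : Int) = ((kn : Nat) : Int) + ((n - kn : Nat) : Int) := by
    rw [hdslen]; omega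
  have hB : dna_vector_alt dna k
      = ((pvIdxs ds kn 0).toNat :: (List.range (n - kn)).map (fun j => (pvIdxs ds kn (j + 1)).toNat)).foldl
          (fun v i => v.set i 1) v0 := by
    simp only [dna_vector_alt, ← hcs, ← hkeq, Int.toNat_natCast, ← hnd, if_neg hkle0',
      if_neg hn0', hds9', hslice', hidx0, ← hv0d, hset0, hlen9', hbloop]
    rw [List.foldl_cons]
  -- compare
  rw [hA, hB,
    show (PySem.Set.ofList ((pvWins cs kn 0).map String.ofList)).foldl
        (fun v s => v.set ((shingle2decimal s).getD 0).toNat 1) v0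
      = ((PySem.Set.ofList ((pvWins cs kn 0).map String.ofList)).map
          (fun s => ((shingle2decimal s).getD 0).toNat)).foldl (fun v i => v.set i 1) v0
      from (List.foldl_map (f := fun s => ((shingle2decimal s).getD 0).toNat)
        (g := fun v i => v.set i 1) (l := PySem.Set.ofList ((pvWins cs kn 0).map String.ofList))
        (init := v0)).symm]
  have hLA : ∀ j : Nat, (j ∈ (PySem.Set.ofList ((pvWins cs kn 0).map String.ofList)).map
      (fun s => ((shingle2decimal s).getD 0).toNat)) ↔ ∃ i, i + kn ≤ n ∧ (pvIdxs ds kn i).toNat = j := by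
    intro j
    rw [List.mem_map]
    constructor
    · rintro ⟨s, hs, rfl⟩
      rw [PySem.Set.mem_ofList, List.mem_map] at hs
      obtain ⟨w, hw, rfl⟩ := hs
      obtain ⟨i, hi, rfl⟩ := (hWmem w).mp hw
      exact ⟨i, hi, by rw [hdec i hi, Option.getD_some]⟩
    · rintro ⟨i, hi, rfl⟩
      refine ⟨String.ofList ((cs.drop i).take kn), ?_, by rw [hdec i hi, Option.getD_some]⟩
      rw [PySem.Set.mem_ofList, List.mem_map]
      exact ⟨(cs.drop i).take kn, (hWmem _).mpr ⟨i, hi, rfl⟩, rfl⟩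
  have hLB : ∀ j : Nat, (j ∈ (pvIdxs ds kn 0).toNat
        :: (List.range (n - kn)).map (fun j => (pvIdxs ds kn (j + 1)).toNat))
      ↔ ∃ i, i + kn ≤ n ∧ (pvIdxs ds kn i).toNat = j := by
    intro j
    rw [List.mem_cons, List.mem_map]
    constructor
    · rintro (rfl | ⟨t, ht, rfl⟩)
      · exact ⟨0, by omega, rfl⟩
      · rw [List.mem_range] at ht
        exact ⟨t + 1, by omega, rfl⟩
    · rintro ⟨i, hi, rfl⟩
      rcases i with _ | t
      · exact Or.inl rfl
      · exact Or.inr ⟨t, by rw [List.mem_range]; omega, rfl⟩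
  apply List.ext_getElem
  · rw [pvFoldlSet_length, pvFoldlSet_length]
  intro j hj1 hj2
  have hjv : j < v0.length := by rwa [pvFoldlSet_length] at hj1
  rw [pvFoldlSet_getElem _ v0 j hjv, pvFoldlSet_getElem _ v0 j hjv]
  have hmem := (hLA j).trans (hLB j).symm
  by_cases hj : j ∈ (PySem.Set.ofList ((pvWins cs kn 0).map String.ofList)).map
      (fun s => ((shingle2decimal s).getD 0).toNat)
  · rw [if_pos hj, if_pos (hmem.mp hj)]
  · rw [if_neg hj, if_neg (fun h => hj (hmem.mpr h))]

-- ===== VERDICT (by name: the statement is the Claim_ definition above) =====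
theorem dna_vector_spec : Claim_equal_dna_vector := by
  intro dna k _ hpre
  unfold Spec_dna_vector
  exact pvMain dna k hpre
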